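-- pv_equiv track=rewrite | github.com/voicetreelab/voicetree-evals | metabench/kaggle_submission/verifiers/ve.py | evaluate_ordering_peak_from_scopes
-- ===== SOURCE A (Python) =====
-- from typing import Any, Iterable, Sequence
--
-- def evaluate_ordering_peak_from_scopes(
--     initial_scopes: Sequence[frozenset[str]],
--     ordering: Sequence[str],
-- ) -> int:
--     scopes = [set(scope) for scope in initial_scopes if scope]
--     peak_factor_size = max((len(scope) for scope in scopes), default=1)
--     for variable_name in ordering:
--         touched = [scope for scope in scopes if variable_name in scope]
--         untouched = [scope for scope in scopes if variable_name not in scope]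
--         if not touched:
--             scopes = untouched
--             continue
--         merged_scope = set().union(*touched)
--         peak_factor_size = max(peak_factor_size, len(merged_scope))
--         next_scope = merged_scope - {variable_name}
--         if next_scope:
--             untouched.append(next_scope)
--         scopes = untouched
--     return peak_factor_size
-- ===== SOURCE B (Python) =====
-- def _register(store, index, nid, s):
--     """Store scope s under a fresh id and add that id to each variable's bucket."""
--     store[nid] = s
--     for u in s:
--         index.setdefault(u, []).append(nid)
--     return nid + 1
--
--
-- def evaluate_ordering_peak_from_scopes(initial_scopes, ordering):
--     # Bucket index variable -> scope ids (lazy deletion): each elimination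
--     # step consults only the bucket of the eliminated variable.
--     store = {}   # scope id -> set of variables (live scopes)
--     index = {}   # variable -> ids of scopes created containing it (lazy deletion)
--     nid = 0
--     peak = 1
--     for scope in initial_scopes:
--         s = set(scope)
--         if s:
--             peak = max(peak, len(s))
--             nid = _register(store, index, nid, s)
--     for v in ordering:
--         ids = index.pop(v, [])
--         live = [i for i in ids if i in store]
--         if not live:
--             continue
--         merged = set()
--         for i in live:
--             merged |= store[i]
--         for i in live:
--             del store[i]
--         peak = max(peak, len(merged))
--         merged.discard(v)
--         if merged:
--             nid = _register(store, index, nid, merged)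
--     return peak
-- ===== Notes on version B (the rewrite author's own statement) =====
-- stated objective: alternative
-- what changed: A recomputes touched/untouched by filtering the entire scope list at every elimination step and unions the touched scopes from scratch; B maintains an id-keyed scope store plus a variable-to-scope-id bucket index with lazy deletion, locating and merging exactly the scopes whose bucket names the eliminated variable.
import Mathlib
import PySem

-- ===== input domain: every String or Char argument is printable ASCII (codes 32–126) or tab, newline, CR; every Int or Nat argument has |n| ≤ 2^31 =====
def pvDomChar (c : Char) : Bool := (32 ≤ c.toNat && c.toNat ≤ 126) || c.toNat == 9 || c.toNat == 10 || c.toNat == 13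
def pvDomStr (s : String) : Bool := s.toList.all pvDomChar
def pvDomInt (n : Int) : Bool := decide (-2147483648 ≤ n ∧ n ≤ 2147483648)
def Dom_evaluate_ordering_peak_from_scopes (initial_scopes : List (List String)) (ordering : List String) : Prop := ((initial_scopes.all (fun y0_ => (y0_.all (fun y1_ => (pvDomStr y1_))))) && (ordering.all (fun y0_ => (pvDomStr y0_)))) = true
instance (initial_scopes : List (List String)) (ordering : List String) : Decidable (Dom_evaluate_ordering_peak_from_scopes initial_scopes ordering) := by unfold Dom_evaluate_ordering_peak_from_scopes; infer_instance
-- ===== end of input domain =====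

-- B replaces A's per-step filtering of the whole scope list by a variable→scope-id
-- bucket index plus an id-keyed scope store: a step merges the scopes its bucket names.

-- ===== PORT A =====
-- loop body of A's 'for variable_name in ordering' over the state (scopes, peak_factor_size)
def aStep (st : List (PySem.Set String) × Int) (variable_name : String) :
    List (PySem.Set String) × Int :=
  let touched := st.1.filter (fun scope => PySem.Set.contains scope variable_name)
  let untouched := st.1.filter (fun scope => !PySem.Set.contains scope variable_name)
  if touched.isEmpty then (untouched, st.2)
  else
    let merged_scope := touched.foldl PySem.Set.union PySem.Set.empty  -- set().union(*touched)
    let peak := max st.2 (PySem.Set.len merged_scope)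
    let next_scope := PySem.Set.discard merged_scope variable_name
    (if next_scope.isEmpty then untouched else untouched ++ [next_scope], peak)

def evaluate_ordering_peak_from_scopes (initial_scopes : List (List String)) (ordering : List String) : Int :=
  let scopes : List (PySem.Set String) :=
    (initial_scopes.filter (fun scope => !scope.isEmpty)).map PySem.Set.ofList
  let peak_factor_size : Int := PySem.List.maxD (scopes.map PySem.Set.len) (fun x => x) 1
  (ordering.foldl aStep (scopes, peak_factor_size)).2

-- ===== PORT B =====
structure BState where
  store : PySem.Dict Int (PySem.Set String)   -- scope id -> scope (live scopes)
  index : PySem.Dict String (List Int)        -- variable -> ids of scopes created containing it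
  nid   : Int
  peak  : Int
  deriving Repr, DecidableEq

-- B's helper _register: store scope s under the fresh id st.nid, add the id to each bucket
def bRegister (st : BState) (s : PySem.Set String) : BState :=
  { store := st.store.insert st.nid s,
    index := s.foldl (fun ix u => ix.modify u [] (fun l => l ++ [st.nid])) st.index,
    nid := st.nid + 1,
    peak := st.peak }

-- loop body of B's first loop 'for scope in initial_scopes'
def bInit (st : BState) (scope : List String) : BState :=
  let s : PySem.Set String := PySem.Set.ofList scope
  if s.isEmpty then st
  else bRegister { st with peak := max st.peak (PySem.Set.len s) } s

-- loop body of B's second loop 'for v in ordering'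
def bStep (st : BState) (v : String) : BState :=
  let ids := st.index.getD v []
  let index := st.index.erase v     -- index.pop(v, [])
  let live := ids.filter (fun i => st.store.contains i)
  if live.isEmpty then { st with index := index }
  else
    let merged := live.foldl (fun acc i => PySem.Set.union acc (st.store.getD i [])) PySem.Set.empty
    let store := live.foldl PySem.Dict.erase st.store
    let peak := max st.peak (PySem.Set.len merged)
    let nxt := PySem.Set.discard merged v
    if nxt.isEmpty then { store := store, index := index, nid := st.nid, peak := peak }
    else bRegister { store := store, index := index, nid := st.nid, peak := peak } nxt

def evaluate_ordering_peak_from_scopes_alt (initial_scopes : List (List String)) (ordering : List String) : Int :=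
  let st0 : BState := initial_scopes.foldl bInit ⟨PySem.Dict.empty, PySem.Dict.empty, 0, 1⟩
  (ordering.foldl bStep st0).peak

-- ===== PRECONDITION & SPEC =====
def Spec_evaluate_ordering_peak_from_scopes (initial_scopes : List (List String)) (ordering : List String) (out : Int) : Prop := out = evaluate_ordering_peak_from_scopes_alt initial_scopes ordering
instance (initial_scopes : List (List String)) (ordering : List String) (out : Int) : Decidable (Spec_evaluate_ordering_peak_from_scopes initial_scopes ordering out) := by unfold Spec_evaluate_ordering_peak_from_scopes; infer_instance

-- ===== CLAIM (what is proved, stated in full; the proofs are below) =====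
def Claim_equal_evaluate_ordering_peak_from_scopes : Prop := ∀ (initial_scopes : List (List String)) (ordering : List String), Dom_evaluate_ordering_peak_from_scopes initial_scopes ordering → Spec_evaluate_ordering_peak_from_scopes initial_scopes ordering (evaluate_ordering_peak_from_scopes initial_scopes ordering)

-- ===== LEMMAS AND PROOFS =====

-- The simulation invariant tying A's scope list to B's store/index state.
def InvB (scopes : List (PySem.Set String)) (st : BState) : Prop :=
  st.store.values = scopes ∧
  st.store.keys.Nodup ∧
  (∀ i ∈ st.store.keys, i < st.nid) ∧
  (∀ w i, i ∈ st.index.getD w [] → i < st.nid) ∧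
  (∀ w, (st.index.getD w []).filter (fun i => st.store.contains i) =
        (st.store.items.filter (fun p => PySem.Set.contains p.2 w)).map (fun p => p.1))

-- filter commutes with map (comp-unfolded corollary of List.filter_map)
theorem filter_map' {α β : Type} (l : List α) (f : α → β) (q : β → Bool) :
    (l.map f).filter q = (l.filter (fun x => q (f x))).map f := by
  rw [List.filter_map]; rfl

-- a fold of dict erasures is one filter of the items
theorem items_foldl_erase {ν : Type} (L : List Int) (d : PySem.Dict Int ν) :
    (L.foldl PySem.Dict.erase d).items = d.items.filter (fun p => !L.contains p.1) := by
  induction L generalizing d with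
  | nil => simp
  | cons k rest ih =>
    simp only [List.foldl_cons, ih, PySem.Dict.erase, List.filter_filter]
    apply List.filter_congr
    intro p _
    by_cases h : p.1 = k <;> simp [h]

theorem find?_filter_ne {κ ν : Type} [BEq κ] [LawfulBEq κ] (l : List (κ × ν)) (k w : κ) (h : w ≠ k) :
    (l.filter (fun p => !(p.1 == k))).find? (fun p => p.1 == w) = l.find? (fun p => p.1 == w) := by
  induction l with
  | nil => rfl
  | cons p rest ih =>
    by_cases hk : p.1 = k
    · have hkw : (k == w) = false := by simp; exact fun e => h e.symm
      simp [List.filter_cons, hk, List.find?_cons, hkw, ih]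
    · by_cases hw : p.1 = w
      · have hwk : (w == k) = false := by simp [h]
        simp [List.filter_cons, hw, hwk, List.find?_cons]
      · simp [List.filter_cons, hk, List.find?_cons, hw, ih]

theorem getD_erase {κ ν : Type} [BEq κ] [LawfulBEq κ] [DecidableEq κ] (d : PySem.Dict κ ν) (k w : κ) (d0 : ν) :
    (d.erase k).getD w d0 = if w = k then d0 else d.getD w d0 := by
  simp only [PySem.Dict.getD, PySem.Dict.get?, PySem.Dict.erase]
  by_cases h : w = k
  · subst h
    have : ∀ p ∈ d.items.filter (fun p => !(p.1 == w)), ¬ ((fun p => p.1 == w) p = true) := by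
      intro p hp
      have := (List.mem_filter.1 hp).2
      simpa using this
    rw [List.find?_eq_none.2 this]
    simp
  · rw [find?_filter_ne _ _ _ h]
    simp [h]

theorem filter_beq_of_nodup (s : List String) (w : String) (hs : s.Nodup) :
    s.filter (fun u => u == w) = if w ∈ s then [w] else [] := by
  induction s with
  | nil => simp
  | cons a rest ih =>
    rw [List.nodup_cons] at hs
    by_cases h : a = w
    · subst h
      simp [List.filter_cons, ih hs.2, hs.1]
    · simp [List.filter_cons, h, ih hs.2, Ne.symm h]

-- the bucket registration fold appends the fresh id to exactly the buckets of s's members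
theorem getD_register_index (s : List String) (hs : s.Nodup) (ix : PySem.Dict String (List Int)) (n : Int) (w : String) :
    (s.foldl (fun ix u => ix.modify u [] (fun l => l ++ [n])) ix).getD w [] =
      ix.getD w [] ++ (if w ∈ s then [n] else []) := by
  have h1 : s.foldl (fun ix u => ix.modify u [] (fun l => l ++ [n])) ix
      = (s.map (fun u => (u, n))).foldl (fun d p => d.modify p.1 [] (fun l => l ++ [p.2])) ix := by
    rw [List.foldl_map]
  rw [h1, PySem.Dict.getD_foldl_modify_append]
  congr 1
  rw [filter_map' s (fun u => (u, n)) (fun p => p.1 == w), filter_beq_of_nodup s w hs]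
  by_cases h : w ∈ s <;> simp [h]

theorem nodup_foldl_union (l : List (PySem.Set String)) :
    ∀ acc : PySem.Set String, acc.Nodup → (l.foldl PySem.Set.union acc).Nodup := by
  induction l with
  | nil => intro acc h; simpa using h
  | cons x rest ih => intro acc h; exact ih _ (PySem.Set.nodup_union acc x h)

-- Python's max(gen, default=1) over values all ≥ 1 is the running max from 1
theorem max?_foldl_some (l : List Int) : ∀ a : Int,
    PySem.List.max? (a :: l) (fun x => x) = some (l.foldl max a) := by
  induction l with
  | nil => intro a; rfl
  | cons x rest ih =>
    intro a
    have h1 : PySem.List.max? (a :: x :: rest) (fun x => x)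
        = PySem.List.max? (max a x :: rest) (fun x => x) := by
      simp only [PySem.List.max?, List.foldl_cons]
      congr 1
      rcases lt_or_ge a x with h | h
      · simp [h, max_eq_right (le_of_lt h)]
      · simp [not_lt_of_ge h, max_eq_left h]
    rw [h1, ih, List.foldl_cons]

theorem foldl_max_eq_maxD (l : List Int) (h : ∀ x ∈ l, 1 ≤ x) :
    l.foldl max 1 = PySem.List.maxD l (fun x => x) 1 := by
  cases l with
  | nil => rfl
  | cons x rest =>
    have hx : max 1 x = x := max_eq_right (h x (by simp))
    simp only [PySem.List.maxD, max?_foldl_some, Option.getD_some, List.foldl_cons, hx]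

-- store keys determine items
theorem item_ext (d : PySem.Dict Int (PySem.Set String)) (hk : d.keys.Nodup)
    {p q : Int × PySem.Set String} (hp : p ∈ d.items) (hq : q ∈ d.items) (h : p.1 = q.1) : p = q :=
  List.inj_on_of_nodup_map hk hp hq h

-- registration preserves the invariant, adding s at the end of the scope list
theorem invB_register (scopes : List (PySem.Set String)) (st : BState) (s : PySem.Set String)
    (h : InvB scopes st) (hs : s.Nodup) : InvB (scopes ++ [s]) (bRegister st s) := by
  obtain ⟨hv, hk, hb, hib, hidx⟩ := h
  have hfresh : st.store.contains st.nid = false := by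
    by_contra hc
    have : st.nid ∈ st.store.keys := (PySem.Dict.contains_iff_mem_keys _ _).1 (by simpa using hc)
    exact absurd (hb _ this) (by omega)
  have hitems : (st.store.insert st.nid s).items = st.store.items ++ [(st.nid, s)] :=
    PySem.Dict.items_insert_of_not_contains _ _ hfresh
  have hkeys : (st.store.insert st.nid s).keys = st.store.keys ++ [st.nid] :=
    PySem.Dict.keys_insert_of_not_contains _ _ hfresh
  have hnidmem : st.nid ∉ st.store.keys := fun hm => absurd (hb _ hm) (by omega)
  refine ⟨?_, ?_, ?_, ?_, ?_⟩
  · show (st.store.insert st.nid s).values = scopes ++ [s]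
    have hval : (st.store.insert st.nid s).values = st.store.values ++ [s] := by
      simp [PySem.Dict.values, hitems]
    rw [hval, hv]
  · show (st.store.insert st.nid s).keys.Nodup
    rw [hkeys, List.nodup_append]
    refine ⟨hk, by simp, ?_⟩
    intro a ha b hbm
    have hb : b = st.nid := by simpa using hbm
    subst hb
    exact fun he => hnidmem (he ▸ ha)
  · show ∀ i ∈ (st.store.insert st.nid s).keys, i < st.nid + 1
    intro i hi
    rw [hkeys] at hi
    rcases List.mem_append.1 hi with hi | hi
    · have := hb _ hi; omega
    · simp only [List.mem_singleton] at hi; omega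
  · show ∀ (w : String), ∀ i ∈ (s.foldl (fun ix u => ix.modify u [] (fun l => l ++ [st.nid])) st.index).getD w [], i < st.nid + 1
    intro w i hi
    rw [getD_register_index s hs _ _ w] at hi
    rcases List.mem_append.1 hi with hi | hi
    · have := hib w i hi; omega
    · by_cases hw : w ∈ s
      · simp [hw] at hi; omega
      · simp [hw] at hi
  · intro w
    show ((s.foldl (fun ix u => ix.modify u [] (fun l => l ++ [st.nid])) st.index).getD w []).filter (fun i => (st.store.insert st.nid s).contains i) = ((st.store.insert st.nid s).items.filter (fun p => PySem.Set.contains p.2 w)).map (fun p => p.1)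
    rw [getD_register_index s hs _ _ w, hitems]
    simp only [List.filter_append, List.map_append]
    congr 1
    · rw [← hidx w]
      apply List.filter_congr
      intro i hi
      have hlt : i < st.nid := hib w i hi
      have hne : (i == st.nid) = false := by simp; omega
      rw [PySem.Dict.contains_insert, hne, Bool.false_or]
    · by_cases hw : w ∈ s
      · have h1 : PySem.Set.contains s w = true := (PySem.Set.contains_iff s w).2 hw
        have h2 : (st.store.insert st.nid s).contains st.nid = true := by
          rw [PySem.Dict.contains_insert]; simp
        simp [hw, h1, h2, List.filter_cons]
      · have h1 : PySem.Set.contains s w = false := by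
          cases hc : PySem.Set.contains s w
          · rfl
          · exact absurd ((PySem.Set.contains_iff s w).1 hc) hw
        simp [hw, h1, List.filter_cons]

theorem invB_init_gen (l : List (List String)) : ∀ (scopes : List (PySem.Set String)) (st : BState),
    InvB scopes st →
    InvB (scopes ++ (l.filter (fun sc => !sc.isEmpty)).map PySem.Set.ofList) (l.foldl bInit st) ∧
    (l.foldl bInit st).peak =
      ((l.filter (fun sc => !sc.isEmpty)).map PySem.Set.ofList).foldl
        (fun p s => max p (PySem.Set.len s)) st.peak := by
  induction l with
  | nil =>
    intro scopes st h
    constructor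
    · simpa using h
    · simp
  | cons scope rest ih =>
    intro scopes st h
    by_cases he : scope.isEmpty
    · have hsc : scope = [] := by simpa using he
      subst hsc
      simpa [bInit] using ih scopes st h
    · have hof : (PySem.Set.ofList scope).isEmpty = false := by
        cases scope with
        | nil => simp at he
        | cons a rest' =>
          have hmem : a ∈ PySem.Set.ofList (a :: rest') := (PySem.Set.mem_ofList _ _).2 (by simp)
          cases hy : PySem.Set.ofList (a :: rest') with
          | nil => rw [hy] at hmem; simp at hmem
          | cons x xs => rfl
      have hstep : bInit st scope = bRegister { st with peak := max st.peak (PySem.Set.len (PySem.Set.ofList scope)) } (PySem.Set.ofList scope) := by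
        simp [bInit, hof]
      have hInv' : InvB scopes { st with peak := max st.peak (PySem.Set.len (PySem.Set.ofList scope)) } := by
        obtain ⟨a1, a2, a3, a4, a5⟩ := h
        exact ⟨a1, a2, a3, a4, a5⟩
      have h2 := invB_register scopes _ _ hInv' (PySem.Set.nodup_ofList scope)
      have h3 := ih (scopes ++ [PySem.Set.ofList scope]) _ h2
      simp only [List.foldl_cons, hstep]
      constructor
      · have := h3.1
        simpa [he, List.append_assoc] using this
      · have := h3.2
        simp only [bRegister] at this ⊢
        simpa [he] using this

theorem invB_init (initial_scopes : List (List String)) :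
    InvB ((initial_scopes.filter (fun scope => !scope.isEmpty)).map PySem.Set.ofList)
         (initial_scopes.foldl bInit ⟨PySem.Dict.empty, PySem.Dict.empty, 0, 1⟩) ∧
    (initial_scopes.foldl bInit ⟨PySem.Dict.empty, PySem.Dict.empty, 0, 1⟩).peak =
      PySem.List.maxD (((initial_scopes.filter (fun scope => !scope.isEmpty)).map PySem.Set.ofList).map PySem.Set.len) (fun x => x) 1 := by
  have h0 : InvB [] (⟨PySem.Dict.empty, PySem.Dict.empty, 0, 1⟩ : BState) := by
    refine ⟨rfl, by simp [PySem.Dict.keys, PySem.Dict.empty], by simp [PySem.Dict.keys, PySem.Dict.empty], ?_, ?_⟩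
    · intro w i hi
      simp [PySem.Dict.getD, PySem.Dict.get?, PySem.Dict.empty] at hi
    · intro w
      simp [PySem.Dict.getD, PySem.Dict.get?, PySem.Dict.empty]
  obtain ⟨h1, h2⟩ := invB_init_gen initial_scopes [] _ h0
  refine ⟨by simpa using h1, ?_⟩
  rw [h2]
  have hge : ∀ x ∈ ((initial_scopes.filter (fun sc => !sc.isEmpty)).map PySem.Set.ofList).map PySem.Set.len, 1 ≤ x := by
    intro x hx
    rcases List.mem_map.1 hx with ⟨s, hs, rfl⟩
    rcases List.mem_map.1 hs with ⟨sc, hsc, rfl⟩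
    have hne : ¬ sc.isEmpty := by simpa using (List.mem_filter.1 hsc).2
    cases sc with
    | nil => simp at hne
    | cons a rest =>
      have : a ∈ PySem.Set.ofList (a :: rest) := (PySem.Set.mem_ofList _ _).2 (by simp)
      have hlen : 1 ≤ (PySem.Set.ofList (a :: rest)).length := List.length_pos_of_mem this
      simp only [PySem.Set.len]
      exact_mod_cast hlen
  rw [← foldl_max_eq_maxD _ hge, List.map_map]
  simp [List.foldl_map]

theorem contains_foldl_erase {ν : Type} (L : List Int) (d : PySem.Dict Int ν) (i : Int) :
    (L.foldl PySem.Dict.erase d).contains i = (d.contains i && !(L.contains i)) := by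
  show ((L.foldl PySem.Dict.erase d).items.any (fun p => p.1 == i)) = _
  rw [items_foldl_erase, List.any_filter]
  cases hli : L.contains i
  · simp only [Bool.not_false, Bool.and_true]
    have hcong : ∀ p ∈ d.items, (!L.contains p.1 && (p.1 == i)) = ((fun p : Int × ν => p.1 == i) p) := by
      intro p _
      by_cases hpi : p.1 = i
      · have hni : i ∉ L := by simpa using hli
        simp [hpi, hni]
      · simp [hpi]
    rw [PySem.List.any_congr_mem hcong]
    rfl
  · simp only [Bool.not_true, Bool.and_false]
    rw [List.any_eq_false]
    intro p hp
    by_cases hpi : p.1 = i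
    · rw [hpi, hli]; simp
    · simp [hpi]

-- after eliminating v, B's store is exactly A's untouched scope list
theorem invB_mid (scopes : List (PySem.Set String)) (st : BState) (v : String) (pk : Int)
    (h : InvB scopes st) :
    InvB (scopes.filter (fun sc => !PySem.Set.contains sc v))
      ⟨((st.index.getD v []).filter (fun i => st.store.contains i)).foldl PySem.Dict.erase st.store,
        st.index.erase v, st.nid, pk⟩ := by
  obtain ⟨hv, hk, hb, hib, hidx⟩ := h
  have hlc : ∀ p ∈ st.store.items,
      ((st.index.getD v []).filter (fun i => st.store.contains i)).contains p.1
        = PySem.Set.contains p.2 v := by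
    intro p hp
    by_cases hc : PySem.Set.contains p.2 v = true
    · have hmem : p.1 ∈ (st.store.items.filter (fun q => PySem.Set.contains q.2 v)).map (fun q => q.1) :=
        List.mem_map.2 ⟨p, List.mem_filter.2 ⟨hp, hc⟩, rfl⟩
      rw [hidx v, hc]
      exact List.contains_iff_mem.2 hmem
    · have hcf : PySem.Set.contains p.2 v = false := by
        cases hx : PySem.Set.contains p.2 v
        · rfl
        · exact absurd hx hc
      rw [hcf]
      by_contra hcon
      have htrue : ((st.index.getD v []).filter (fun i => st.store.contains i)).contains p.1 = true := by
        cases hx : ((st.index.getD v []).filter (fun i => st.store.contains i)).contains p.1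
        · exact absurd hx hcon
        · rfl
      have hmem := List.contains_iff_mem.1 htrue
      rw [hidx v] at hmem
      rcases List.mem_map.1 hmem with ⟨q, hq, hq1⟩
      have hqi := List.mem_of_mem_filter hq
      have heq : q = p := item_ext st.store hk hqi hp hq1
      subst heq
      exact hc (List.mem_filter.1 hq).2
  have hitems' :
      ((((st.index.getD v []).filter (fun i => st.store.contains i)).foldl PySem.Dict.erase st.store)).items
        = st.store.items.filter (fun p => !PySem.Set.contains p.2 v) := by
    rw [items_foldl_erase]
    apply List.filter_congr
    intro p hp
    rw [hlc p hp]
  refine ⟨?_, ?_, ?_, ?_, ?_⟩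
  · simp only [PySem.Dict.values]
    rw [hitems', ← hv]
    simp only [PySem.Dict.values]
    rw [filter_map']
  · simp only [PySem.Dict.keys]
    rw [hitems']
    exact List.Nodup.sublist (List.Sublist.map _ List.filter_sublist) hk
  · intro i hi
    simp only [PySem.Dict.keys] at hi
    rw [hitems'] at hi
    apply hb
    simp only [PySem.Dict.keys]
    exact ((List.Sublist.map _ List.filter_sublist).subset) hi
  · intro w i hi
    simp only at hi
    rw [getD_erase] at hi
    by_cases hw : w = v
    · simp [hw] at hi
    · rw [if_neg hw] at hi
      exact hib w i hi
  · intro w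
    simp only
    rw [getD_erase]
    by_cases hw : w = v
    · subst hw
      rw [if_pos rfl, hitems', List.filter_filter]
      have : ∀ p ∈ st.store.items, ¬ ((PySem.Set.contains p.2 w && !PySem.Set.contains p.2 w) = true) := by
        intro p _
        cases hx : PySem.Set.contains p.2 w <;> simp [hx]
      rw [List.filter_eq_nil_iff.2 this]
      rfl
    · rw [if_neg hw]
      have step1 : (st.index.getD w []).filter
          (fun i => ((((st.index.getD v []).filter (fun i => st.store.contains i)).foldl PySem.Dict.erase st.store)).contains i)
          = ((st.index.getD w []).filter (fun i => st.store.contains i)).filter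
              (fun i => !(((st.index.getD v []).filter (fun i => st.store.contains i)).contains i)) := by
        rw [List.filter_filter]
        apply List.filter_congr
        intro i _
        rw [contains_foldl_erase]
        cases hx : st.store.contains i <;> cases hy : ((st.index.getD v []).filter (fun i => st.store.contains i)).contains i <;> simp [hx, hy]
      rw [step1, hidx w, hitems', filter_map']
      rw [List.filter_filter, List.filter_filter]
      congr 1
      apply List.filter_congr
      intro p hp
      show ((!((st.index.getD v []).filter (fun i => st.store.contains i)).contains p.1) && PySem.Set.contains p.2 w)
          = (PySem.Set.contains p.2 w && !PySem.Set.contains p.2 v)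
      rw [hlc p hp]
      cases hx : PySem.Set.contains p.2 w <;> cases hy : PySem.Set.contains p.2 v <;> simp [hx, hy]

theorem invB_step (scopes : List (PySem.Set String)) (st : BState) (peak : Int) (v : String)
    (h : InvB scopes st) (hp : st.peak = peak) :
    InvB (aStep (scopes, peak) v).1 (bStep st v) ∧ (bStep st v).peak = (aStep (scopes, peak) v).2 := by
  obtain ⟨hv, hk, hb, hib, hidx⟩ := h
  subst hp
  have hliveF : (st.index.getD v []).filter (fun i => st.store.contains i)
      = (st.store.items.filter (fun p => PySem.Set.contains p.2 v)).map (fun p => p.1) := hidx v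
  have htouched : scopes.filter (fun sc => PySem.Set.contains sc v)
      = (st.store.items.filter (fun p => PySem.Set.contains p.2 v)).map (fun p => p.2) := by
    rw [← hv]
    show ((st.store.items.map (fun p => p.2)).filter (fun sc => PySem.Set.contains sc v)) = _
    rw [filter_map']
  have huntouched : scopes.filter (fun sc => !PySem.Set.contains sc v)
      = (st.store.items.filter (fun p => !PySem.Set.contains p.2 v)).map (fun p => p.2) := by
    rw [← hv]
    show ((st.store.items.map (fun p => p.2)).filter (fun sc => !PySem.Set.contains sc v)) = _
    rw [filter_map']
  by_cases hFe : st.store.items.filter (fun p => PySem.Set.contains p.2 v) = []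
  · -- no scope contains v: A keeps all scopes, B only pops the empty bucket
    have hT : scopes.filter (fun sc => PySem.Set.contains sc v) = [] := by rw [htouched, hFe]; rfl
    have hL : (st.index.getD v []).filter (fun i => st.store.contains i) = [] := by
      rw [hliveF, hFe]; rfl
    have hU : scopes.filter (fun sc => !PySem.Set.contains sc v) = scopes := by
      rw [List.filter_eq_self]
      intro sc hsc
      have : ¬ (PySem.Set.contains sc v = true) := by
        intro hc
        have : sc ∈ scopes.filter (fun sc => PySem.Set.contains sc v) := List.mem_filter.2 ⟨hsc, hc⟩
        rw [hT] at this
        exact absurd this (List.not_mem_nil)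
      simpa using this
    have hAeval : aStep (scopes, st.peak) v = (scopes, st.peak) := by
      simp only [aStep, hT, hU, List.isEmpty_nil, if_true]
    have hBeval : bStep st v = { st with index := st.index.erase v } := by
      simp only [bStep, hL, List.isEmpty_nil, if_true]
    rw [hAeval, hBeval]
    refine ⟨⟨hv, hk, hb, ?_, ?_⟩, rfl⟩
    · intro w i hi
      simp only at hi
      rw [getD_erase] at hi
      by_cases hw : w = v
      · simp [hw] at hi
      · rw [if_neg hw] at hi
        exact hib w i hi
    · intro w
      simp only
      rw [getD_erase]
      by_cases hw : w = v
      · subst hw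
        rw [if_pos rfl, hFe]
        rfl
      · rw [if_neg hw]
        exact hidx w
  · -- at least one scope contains v
    have hTne : ¬ (scopes.filter (fun sc => PySem.Set.contains sc v)).isEmpty = true := by
      rw [htouched]
      simpa [List.isEmpty_iff] using hFe
    have hLne : ¬ (((st.index.getD v []).filter (fun i => st.store.contains i)).isEmpty = true) := by
      rw [hliveF]
      simpa [List.isEmpty_iff] using hFe
    have hTb : (scopes.filter (fun sc => PySem.Set.contains sc v)).isEmpty = false := by
      cases hx : (scopes.filter (fun sc => PySem.Set.contains sc v)).isEmpty
      · rfl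
      · exact absurd hx hTne
    have hLb : ((st.index.getD v []).filter (fun i => st.store.contains i)).isEmpty = false := by
      cases hx : ((st.index.getD v []).filter (fun i => st.store.contains i)).isEmpty
      · rfl
      · exact absurd hx hLne
    have hmerged :
        ((st.index.getD v []).filter (fun i => st.store.contains i)).foldl
            (fun acc i => PySem.Set.union acc (st.store.getD i [])) PySem.Set.empty
          = (scopes.filter (fun sc => PySem.Set.contains sc v)).foldl PySem.Set.union PySem.Set.empty := by
      rw [hliveF, List.foldl_map, htouched, List.foldl_map]
      apply PySem.List.foldl_congr_mem
      intro acc p hp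
      have hpi : (p.1, p.2) ∈ st.store.items := by
        simpa using List.mem_of_mem_filter hp
      rw [PySem.Dict.getD_of_mem_items st.store hpi hk []]
    have hBeval : bStep st v =
        (if (PySem.Set.discard ((scopes.filter (fun sc => PySem.Set.contains sc v)).foldl PySem.Set.union PySem.Set.empty) v).isEmpty then
          (⟨((st.index.getD v []).filter (fun i => st.store.contains i)).foldl PySem.Dict.erase st.store,
            st.index.erase v, st.nid,
            max st.peak (PySem.Set.len ((scopes.filter (fun sc => PySem.Set.contains sc v)).foldl PySem.Set.union PySem.Set.empty))⟩ : BState)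
        else
          bRegister
            (⟨((st.index.getD v []).filter (fun i => st.store.contains i)).foldl PySem.Dict.erase st.store,
              st.index.erase v, st.nid,
              max st.peak (PySem.Set.len ((scopes.filter (fun sc => PySem.Set.contains sc v)).foldl PySem.Set.union PySem.Set.empty))⟩ : BState)
            (PySem.Set.discard ((scopes.filter (fun sc => PySem.Set.contains sc v)).foldl PySem.Set.union PySem.Set.empty) v)) := by
      simp only [bStep, hLb, Bool.false_eq_true, if_false, hmerged]
    have hAeval : aStep (scopes, st.peak) v =
        ((if (PySem.Set.discard ((scopes.filter (fun sc => PySem.Set.contains sc v)).foldl PySem.Set.union PySem.Set.empty) v).isEmpty then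
            scopes.filter (fun sc => !PySem.Set.contains sc v)
          else
            scopes.filter (fun sc => !PySem.Set.contains sc v) ++
              [PySem.Set.discard ((scopes.filter (fun sc => PySem.Set.contains sc v)).foldl PySem.Set.union PySem.Set.empty) v]),
          max st.peak (PySem.Set.len ((scopes.filter (fun sc => PySem.Set.contains sc v)).foldl PySem.Set.union PySem.Set.empty))) := by
      simp only [aStep, hTb, Bool.false_eq_true, if_false]
    rw [hAeval, hBeval]
    have hmid := invB_mid scopes st v
      (max st.peak (PySem.Set.len ((scopes.filter (fun sc => PySem.Set.contains sc v)).foldl PySem.Set.union PySem.Set.empty)))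
      ⟨hv, hk, hb, hib, hidx⟩
    by_cases hnx : (PySem.Set.discard ((scopes.filter (fun sc => PySem.Set.contains sc v)).foldl PySem.Set.union PySem.Set.empty) v).isEmpty = true
    · rw [if_pos hnx, if_pos hnx]
      exact ⟨hmid, rfl⟩
    · rw [if_neg hnx, if_neg hnx]
      have hnod : (PySem.Set.discard ((scopes.filter (fun sc => PySem.Set.contains sc v)).foldl PySem.Set.union PySem.Set.empty) v).Nodup :=
        PySem.Set.nodup_discard _ _ (nodup_foldl_union _ _ List.nodup_nil)
      exact ⟨invB_register _ _ _ hmid hnod, rfl⟩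

theorem foldl_sim (ordering : List String) : ∀ (scopes : List (PySem.Set String)) (st : BState),
    InvB scopes st →
    (ordering.foldl bStep st).peak = (ordering.foldl aStep (scopes, st.peak)).2 := by
  induction ordering with
  | nil => intro scopes st _; rfl
  | cons v rest ih =>
    intro scopes st h
    obtain ⟨h1, h2⟩ := invB_step scopes st st.peak v h rfl
    have h3 := ih _ _ h1
    rw [h2] at h3
    simpa using h3

-- ===== VERDICT (by name: the statement is the Claim_ definition above) =====
theorem evaluate_ordering_peak_from_scopes_spec : Claim_equal_evaluate_ordering_peak_from_scopes := by
  intro initial_scopes ordering _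
  unfold Spec_evaluate_ordering_peak_from_scopes
  unfold evaluate_ordering_peak_from_scopes evaluate_ordering_peak_from_scopes_alt
  obtain ⟨h0, hp0⟩ := invB_init initial_scopes
  rw [foldl_sim ordering _ _ h0, hp0]
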